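-- pv_equiv track=rewrite | github.com/ZHANGV25/poker-engine-2026 | submission/precompute_preflop.py | canonicalize_hand
-- ===== SOURCE A (Python) =====
-- def canonicalize_hand(cards):
--     """Convert a 5-card hand to canonical form under suit permutation.
--
--     Relabel suits so the first-seen suit becomes 0, second becomes 1, third becomes 2.
--     Returns a tuple of canonical card ints, sorted.
--     """
--     suit_map = {}
--     next_suit = 0
--     canonical = []
--     for c in sorted(cards):
--         rank = c % 9
--         suit = c // 9
--         if suit not in suit_map:
--             suit_map[suit] = next_suit
--             next_suit += 1
--         canonical.append(rank + suit_map[suit] * 9)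
--     return tuple(sorted(canonical))
-- ===== SOURCE B (Python) =====
-- def canonicalize_hand(cards):
--     """Canonical form under suit relabeling: label suits by ascending minimum card."""
--     mins = {}
--     for c in cards:
--         s = c // 9
--         mins[s] = min(mins.get(s, c), c)
--     label = {s: i for i, (s, _) in enumerate(sorted(mins.items(), key=lambda kv: kv[1]))}
--     return tuple(sorted(c % 9 + label[c // 9] * 9 for c in cards))
-- ===== Notes on version B (the rewrite author's own statement) =====
-- stated objective: alternative
-- what changed: Replaces A's stateful first-seen suit numbering over the sorted hand by a per-suit minimum-card dictionary whose keys, sorted by that minimum, are enumerated to assign labels; no sorted pass is needed to decide labels.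
import Mathlib
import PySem

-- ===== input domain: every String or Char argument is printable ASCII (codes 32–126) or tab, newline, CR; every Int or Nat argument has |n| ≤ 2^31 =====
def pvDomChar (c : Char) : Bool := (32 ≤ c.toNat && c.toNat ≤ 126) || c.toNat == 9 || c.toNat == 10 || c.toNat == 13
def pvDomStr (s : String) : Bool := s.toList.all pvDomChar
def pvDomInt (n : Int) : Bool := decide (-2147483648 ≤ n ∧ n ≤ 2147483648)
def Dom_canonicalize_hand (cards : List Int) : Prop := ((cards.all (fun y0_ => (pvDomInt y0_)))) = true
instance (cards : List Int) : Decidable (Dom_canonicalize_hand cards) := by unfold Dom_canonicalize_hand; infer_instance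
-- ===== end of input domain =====

-- B relabels suits by sorting each suit's minimum card instead of A's stateful
-- first-seen numbering over the sorted hand (objective: alternative decomposition).

-- ===== PORT A =====
-- A: walk sorted(cards), assign suit labels in first-seen order via a counter dict,
-- then sort the relabeled cards.  suit_map[suit] is always present when read, so
-- the lookup is ported as get? + getD (KeyError is unreachable).
def canonicalize_hand (cards : List Int) : List Int :=
  let st := (PySem.List.sorted cards (fun c => c) false).foldl
    (fun (st : PySem.Dict Int Int × Int × List Int) c =>
      let rank := PySem.Int.mod c 9
      let suit := PySem.Int.floordiv c 9
      let sm := if st.1.contains suit then st.1 else st.1.insert suit st.2.1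
      let ns := if st.1.contains suit then st.2.1 else st.2.1 + 1
      (sm, ns, st.2.2 ++ [rank + (sm.get? suit).getD 0 * 9]))
    (PySem.Dict.empty, 0, [])
  PySem.List.sorted st.2.2 (fun c => c) false

-- ===== PORT B =====
-- B: per-suit minimum card via one dict pass, labels assigned by enumerating the
-- suits sorted by that minimum, then one map + sort.  label[c // 9] is always
-- present when read, so the lookup is ported as get? + getD (KeyError unreachable).
def canonicalize_hand_alt (cards : List Int) : List Int :=
  let mins := cards.foldl
    (fun (m : PySem.Dict Int Int) c =>
      m.insert (PySem.Int.floordiv c 9) (min (m.getD (PySem.Int.floordiv c 9) c) c))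
    PySem.Dict.empty
  let label := (PySem.List.enumerate (PySem.List.sorted mins.items (fun kv => kv.2) false) 0).foldl
    (fun (d : PySem.Dict Int Int) p => d.insert p.2.1 p.1) PySem.Dict.empty
  PySem.List.sorted
    (cards.map (fun c =>
      PySem.Int.mod c 9 + (label.get? (PySem.Int.floordiv c 9)).getD 0 * 9))
    (fun c => c) false

-- ===== PRECONDITION & SPEC =====
def Spec_canonicalize_hand (cards : List Int) (out : List Int) : Prop := out = canonicalize_hand_alt cards
instance (cards : List Int) (out : List Int) : Decidable (Spec_canonicalize_hand cards out) := by unfold Spec_canonicalize_hand; infer_instance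

-- ===== CLAIM (what is proved, stated in full; the proofs are below) =====
def Claim_equal_canonicalize_hand : Prop := ∀ (cards : List Int), Dom_canonicalize_hand cards → Spec_canonicalize_hand cards (canonicalize_hand cards)

-- ===== LEMMAS AND PROOFS =====

-- the suit of a card, and the minimum card of a suit within a list
def pvSuit (c : Int) : Int := PySem.Int.floordiv c 9
def pvMval (l : List Int) (t : Int) : Option Int := (l.filter (fun c => pvSuit c == t)).min?
-- A's loop body, named for the proofs (definitionally the lambda in the port)
def pvStepA (st : PySem.Dict Int Int × Int × List Int) (c : Int) : PySem.Dict Int Int × Int × List Int :=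
  let rank := PySem.Int.mod c 9
  let suit := PySem.Int.floordiv c 9
  let sm := if st.1.contains suit then st.1 else st.1.insert suit st.2.1
  let ns := if st.1.contains suit then st.2.1 else st.2.1 + 1
  (sm, ns, st.2.2 ++ [rank + (sm.get? suit).getD 0 * 9])

lemma pvMin?_cons (c : Int) (l : List Int) :
    (c :: l).min? = Option.merge min (some c) l.min? := by
  rw [List.min?_cons]; cases l.min? <;> simp [Option.merge]

lemma pvMin?_perm (l l' : List Int) (h : l.Perm l') : l.min? = l'.min? := by
  rcases hl : l.min? with _ | a <;> rcases hl' : l'.min? with _ | b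
  · rfl
  · rw [List.min?_eq_none_iff] at hl; subst hl
    simp [h.symm.eq_nil] at hl'
  · rw [List.min?_eq_none_iff] at hl'; subst hl'
    simp [h.eq_nil] at hl
  · rw [List.min?_eq_some_iff] at hl hl'
    have h1 := hl'.2 a (h.mem_iff.mp hl.1)
    have h2 := hl.2 b (h.mem_iff.mpr hl'.1)
    exact congrArg some (le_antisymm h2 h1)

lemma pvMergeAssoc (v c : Int) (x : Option Int) :
    Option.merge min (some (min v c)) x = Option.merge min (some v) (Option.merge min (some c) x) := by
  cases x <;> simp [Option.merge, min_assoc]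

-- B's min-fold: lookup = merge of the initial lookup with the min over the list
lemma pvMinfold_get? (l : List Int) (m : PySem.Dict Int Int) (t : Int) :
    (l.foldl (fun (m : PySem.Dict Int Int) c =>
        m.insert (PySem.Int.floordiv c 9) (min (m.getD (PySem.Int.floordiv c 9) c) c)) m).get? t
      = Option.merge min (m.get? t) (pvMval l t) := by
  induction l generalizing m with
  | nil => cases h : m.get? t <;> simp [pvMval, Option.merge, h]
  | cons c tl ih =>
    simp only [List.foldl_cons]
    rw [ih]
    have hs : PySem.Int.floordiv c 9 = pvSuit c := rfl
    rw [hs]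
    simp only [pvMval, List.filter_cons]
    by_cases hc : pvSuit c = t
    · have hb : (pvSuit c == t) = true := by simp [hc]
      rw [hc] at *
      simp only [hb, if_true]
      rw [pvMin?_cons, PySem.Dict.get?_insert_self]
      cases hm : m.get? t with
      | none =>
        rw [PySem.Dict.getD_of_get?_eq_none m c hm, min_self]
        cases (List.filter (fun c => pvSuit c == t) tl).min? <;> rfl
      | some v =>
        rw [PySem.Dict.getD_of_get?_eq_some m c hm]
        simp only [Option.merge]
        exact pvMergeAssoc v c _
    · have hb : (pvSuit c == t) = false := by simp [hc]
      simp only [hb, Bool.false_eq_true, if_false]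
      rw [PySem.Dict.get?_insert_of_ne m _ (Ne.symm hc)]

lemma pvOfList_cons (x : Int) (xs : List Int) :
    PySem.Set.ofList (x :: xs)
      = x :: (PySem.Set.ofList xs).filter (fun y => !(PySem.Set.contains [x] y)) := by
  rw [PySem.Set.ofList_eq_foldl, List.foldl_cons]
  have h1 : PySem.Set.add ([] : PySem.Set Int) x = [x] := rfl
  rw [h1]
  have h2 : List.foldl PySem.Set.add [x] xs = PySem.Set.update [x] xs := rfl
  rw [h2, PySem.Set.update_eq_append_filter]
  rfl

lemma pvMemHeadFilter (u x : Int) (S : List Int)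
    (h : u ∈ S.filter (fun y => !(PySem.Set.contains [x] y))) : u ∈ S ∧ u ≠ x := by
  have h2 := List.mem_filter.mp h
  simp [PySem.Set.contains] at h2
  exact h2

lemma pvMval_cons_ne (c : Int) (tl : List Int) (t : Int) (h : pvSuit c ≠ t) :
    pvMval (c :: tl) t = pvMval tl t := by
  have hb : (pvSuit c == t) = false := by simp [h]
  simp [pvMval, hb]

lemma pvMval_cons_self (c : Int) (tl : List Int) (hc : ∀ x ∈ tl, c ≤ x) :
    pvMval (c :: tl) (pvSuit c) = some c := by
  have hb : (pvSuit c == pvSuit c) = true := by simp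
  simp only [pvMval, List.filter_cons, hb, if_true]
  rw [List.min?_eq_some_iff]
  refine ⟨List.mem_cons_self, ?_⟩
  intro b hb'
  rcases List.mem_cons.mp hb' with h | h
  · omega
  · exact hc b (List.mem_filter.mp h).1

lemma pvMvalMem (l : List Int) (t : Int) (ht : t ∈ l.map pvSuit) :
    ∃ m, pvMval l t = some m ∧ m ∈ l ∧ pvSuit m = t ∧ ∀ b ∈ l, pvSuit b = t → m ≤ b := by
  obtain ⟨x, hx, hxs⟩ := List.mem_map.mp ht
  have hxf : x ∈ l.filter (fun c => pvSuit c == t) := List.mem_filter.mpr ⟨hx, by simp [hxs]⟩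
  rcases hmv : pvMval l t with _ | m
  · rw [pvMval, List.min?_eq_none_iff] at hmv
    rw [hmv] at hxf; simp at hxf
  · rw [pvMval, List.min?_eq_some_iff] at hmv
    obtain ⟨hmem, hle⟩ := hmv
    obtain ⟨hml, hms⟩ := List.mem_filter.mp hmem
    refine ⟨m, rfl, hml, by simpa using hms, ?_⟩
    intro b hb hbs
    exact hle b (List.mem_filter.mpr ⟨hb, by simp [hbs]⟩)

-- on a sorted list, first-seen suit order is strictly increasing in the suit minima
lemma pvChain (l : List Int) (h : l.Pairwise (· ≤ ·)) :
    (PySem.Set.ofList (l.map pvSuit)).Pairwise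
      (fun t u => (pvMval l t).getD 0 < (pvMval l u).getD 0) := by
  induction l with
  | nil => simp [PySem.Set.ofList]
  | cons c tl ih =>
    obtain ⟨hc, htl⟩ := List.pairwise_cons.mp h
    rw [List.map_cons, pvOfList_cons]
    refine List.pairwise_cons.mpr ⟨?_, ?_⟩
    · intro u hu
      obtain ⟨huS, hune⟩ := pvMemHeadFilter u _ _ hu
      have h1 := pvMval_cons_self c tl hc
      obtain ⟨m, hm, hml, hms, _⟩ := pvMvalMem tl u ((PySem.Set.mem_ofList _ _).mp huS)
      rw [pvMval_cons_ne c tl u (fun e => hune e.symm), h1, hm]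
      simp only [Option.getD_some]
      have hcm : c ≤ m := hc m hml
      have hne : c ≠ m := by
        intro e
        exact hune (by rw [← hms, ← e])
      omega
    · have hp := List.Pairwise.filter (fun y => !(PySem.Set.contains [pvSuit c] y)) (ih htl)
      refine hp.imp_of_mem ?_
      intro a b ha hb hab
      have ha' := (pvMemHeadFilter a _ _ ha).2
      have hb' := (pvMemHeadFilter b _ _ hb).2
      rw [pvMval_cons_ne c tl a (fun e => ha' e.symm),
          pvMval_cons_ne c tl b (fun e => hb' e.symm)]
      exact hab

-- index? into an extension, for a key already present
lemma pvIndex?_update (seen : List Int) (xs : List Int) (t : Int) (ht : t ∈ seen) :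
    PySem.List.index? (PySem.Set.update seen xs) t = PySem.List.index? seen t := by
  rw [PySem.Set.update_eq_append_filter]
  exact PySem.List.index?_append_of_mem _ ht

-- A's fold: the dict assigns first-seen indices, and acc is the map through the final dict
lemma pvAFold (l : List Int) (d : PySem.Dict Int Int) (n : Int) (acc : List Int) (seen : List Int)
    (hinv : ∀ t, d.get? t = (PySem.List.index? seen t).map (fun i => (i : Int)))
    (hn : n = (seen.length : Int)) :
    (∀ t, (l.foldl pvStepA (d, n, acc)).1.get? t
        = (PySem.List.index? (PySem.Set.update seen (l.map pvSuit)) t).map (fun i => (i : Int)))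
    ∧ (l.foldl pvStepA (d, n, acc)).2.2
        = acc ++ l.map (fun c =>
            PySem.Int.mod c 9 + ((l.foldl pvStepA (d, n, acc)).1.get? (pvSuit c)).getD 0 * 9) := by
  induction l generalizing d n acc seen with
  | nil =>
    constructor
    · intro t; exact hinv t
    · simp
  | cons c tl ih =>
    have hcont : d.contains (pvSuit c) = decide (pvSuit c ∈ seen) := by
      rw [PySem.Dict.contains_eq_isSome_get?, hinv]
      rcases h : PySem.List.index? seen (pvSuit c) with _ | i
      · rw [PySem.List.index?_eq_none_iff] at h; simp [h]
      · have hm : pvSuit c ∈ seen := by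
          by_contra hh
          rw [(PySem.List.index?_eq_none_iff _ _).mpr hh] at h
          cases h
        simp [hm]
    by_cases hmem : pvSuit c ∈ seen
    · -- suit already seen: dict and counter unchanged
      have hc : d.contains (pvSuit c) = true := by simp [hcont, hmem]
      have hstep : pvStepA (d, n, acc) c
          = (d, n, acc ++ [PySem.Int.mod c 9 + (d.get? (pvSuit c)).getD 0 * 9]) := by
        simp [pvStepA, pvSuit] at hc ⊢; simp [hc]
      have hupd : PySem.Set.update seen ((c :: tl).map pvSuit)
          = PySem.Set.update seen (tl.map pvSuit) := by
        have h3 : PySem.Set.add seen (pvSuit c) = seen := by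
          simp [PySem.Set.add, hmem]
        simp [PySem.Set.update, List.map_cons, List.foldl_cons, h3]
      rw [List.foldl_cons, hstep]
      obtain ⟨ihd, iha⟩ := ih d n _ seen hinv hn
      refine ⟨by rw [hupd]; exact ihd, ?_⟩
      rw [iha, List.map_cons]
      have hfc : ((tl.foldl pvStepA (d, n, acc ++ [PySem.Int.mod c 9 + (d.get? (pvSuit c)).getD 0 * 9])).1.get? (pvSuit c))
          = d.get? (pvSuit c) := by
        rw [ihd, pvIndex?_update seen _ _ hmem, hinv]
      rw [hfc]
      simp
    · -- new suit: insert with index n = |seen|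
      have hc : d.contains (pvSuit c) = false := by simp [hcont, hmem]
      have hstep : pvStepA (d, n, acc) c
          = (d.insert (pvSuit c) n, n + 1,
             acc ++ [PySem.Int.mod c 9 + ((d.insert (pvSuit c) n).get? (pvSuit c)).getD 0 * 9]) := by
        simp [pvStepA, pvSuit] at hc ⊢; simp [hc]
      have hinv1 : ∀ t, (d.insert (pvSuit c) n).get? t
          = (PySem.List.index? (seen ++ [pvSuit c]) t).map (fun i => (i : Int)) := by
        intro t
        by_cases ht : t = pvSuit c
        · subst ht
          rw [PySem.Dict.get?_insert_self, PySem.List.index?_append_singleton_self _ _ hmem]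
          simp [hn]
        · rw [PySem.Dict.get?_insert_of_ne d n ht, hinv]
          by_cases hts : t ∈ seen
          · rw [PySem.List.index?_append_of_mem _ hts]
          · rw [(PySem.List.index?_eq_none_iff _ _).mpr hts,
                (PySem.List.index?_eq_none_iff _ _).mpr (by simp [hts, ht])]
      have hn1 : n + 1 = ((seen ++ [pvSuit c]).length : Int) := by simp [hn]
      have hupd : PySem.Set.update seen ((c :: tl).map pvSuit)
          = PySem.Set.update (seen ++ [pvSuit c]) (tl.map pvSuit) := by
        have hnc : PySem.Set.contains seen (pvSuit c) = false := by
          rcases h : PySem.Set.contains seen (pvSuit c)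
          · rfl
          · exact absurd ((PySem.Set.contains_iff seen (pvSuit c)).mp h) hmem
        have h3 : PySem.Set.add seen (pvSuit c) = seen ++ [pvSuit c] := by
          simp [PySem.Set.add, hmem]
        simp [PySem.Set.update, List.map_cons, List.foldl_cons, h3]
      rw [List.foldl_cons, hstep]
      obtain ⟨ihd, iha⟩ := ih (d.insert (pvSuit c) n) (n + 1) _ (seen ++ [pvSuit c]) hinv1 hn1
      refine ⟨by rw [hupd]; exact ihd, ?_⟩
      rw [iha, List.map_cons]
      have hfc : ((tl.foldl pvStepA (d.insert (pvSuit c) n, n + 1,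
              acc ++ [PySem.Int.mod c 9 + ((d.insert (pvSuit c) n).get? (pvSuit c)).getD 0 * 9])).1.get? (pvSuit c))
          = (d.insert (pvSuit c) n).get? (pvSuit c) := by
        rw [ihd, pvIndex?_update _ _ _ (by simp), hinv1]
      rw [hfc]
      simp

-- B's label fold over an enumeration: lookup = index among the listed keys
lemma pvLabelFold (ys : List (Int × Int)) (i0 : Int) (d : PySem.Dict Int Int)
    (hnd : (ys.map (·.1)).Nodup) (hf : ∀ k ∈ ys.map (·.1), d.contains k = false) (t : Int) :
    ((PySem.List.enumerate ys i0).foldl (fun (d : PySem.Dict Int Int) p => d.insert p.2.1 p.1) d).get? t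
      = match PySem.List.index? (ys.map (·.1)) t with
        | some i => some (i0 + (i : Int))
        | none => d.get? t := by
  induction ys generalizing i0 d with
  | nil => simp [PySem.List.enumerate]
  | cons p ps ih =>
    rw [PySem.List.enumerate_cons, List.foldl_cons]
    simp only [List.map_cons] at hnd hf ⊢
    have hnd' := hnd.of_cons
    have hp1 : p.1 ∉ ps.map (·.1) := (List.nodup_cons.mp hnd).1
    have hf' : ∀ k ∈ ps.map (·.1), (d.insert p.1 i0).contains k = false := by
      intro k hk
      rw [PySem.Dict.contains_insert]
      have hne : (k == p.1) = false := by
        simp only [beq_eq_false_iff_ne, ne_eq]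
        intro e; exact hp1 (e ▸ hk)
      rw [hne, Bool.false_or]
      exact hf k (List.mem_cons_of_mem _ hk)
    rw [ih (i0 + 1) _ hnd' hf']
    by_cases ht : t = p.1
    · subst ht
      rw [(PySem.List.index?_eq_none_iff _ _).mpr hp1, PySem.List.index?_cons_self]
      simp [PySem.Dict.get?_insert_self]
    · rw [PySem.List.index?_cons_of_ne _ (fun e => ht e.symm)]
      rcases h : PySem.List.index? (ps.map (·.1)) t with _ | i
      · rw [h]
        simp [PySem.Dict.get?_insert_of_ne d i0 ht]
      · rw [h]
        simp only [Option.map_some]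
        congr 1
        push_cast
        ring


-- the common relabeling function: rank + 9 * (index of the suit in first-seen order over the sorted hand)
def pvG (s : List Int) (c : Int) : Int :=
  PySem.Int.mod c 9 + ((PySem.List.index? (PySem.Set.ofList (s.map pvSuit)) (pvSuit c)).map (fun i => (i : Int))).getD 0 * 9

lemma pvUpd0 (xs : List Int) : PySem.Set.update ([] : PySem.Set Int) xs = PySem.Set.ofList xs :=
  (PySem.Set.ofList_eq_foldl _).symm

-- A computes: sort the sorted hand relabeled through pvG
lemma pvA_eq (cards : List Int) :
    canonicalize_hand cards
      = PySem.List.sorted ((PySem.List.sorted cards (fun c => c) false).map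
          (pvG (PySem.List.sorted cards (fun c => c) false))) (fun c => c) false := by
  have hinv0 : ∀ t, (PySem.Dict.empty : PySem.Dict Int Int).get? t
      = (PySem.List.index? ([] : List Int) t).map (fun i => (i : Int)) := by
    intro t
    rw [PySem.Dict.get?_empty, (PySem.List.index?_eq_none_iff _ _).mpr (List.not_mem_nil)]
    rfl
  obtain ⟨hAd, hAa⟩ := pvAFold (PySem.List.sorted cards (fun c => c) false)
    PySem.Dict.empty 0 [] [] hinv0 (by simp)
  show PySem.List.sorted (((PySem.List.sorted cards (fun c => c) false).foldl pvStepA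
      (PySem.Dict.empty, 0, [])).2.2) (fun c => c) false = _
  rw [hAa, List.nil_append]
  congr 1
  apply List.map_congr_left
  intro c _
  rw [hAd, pvUpd0, pvG]

-- B computes: sort the raw hand relabeled through the same pvG
lemma pvB_eq (cards : List Int) :
    canonicalize_hand_alt cards
      = PySem.List.sorted (cards.map
          (pvG (PySem.List.sorted cards (fun c => c) false))) (fun c => c) false := by
  have hperm : (PySem.List.sorted cards (fun c => c) false).Perm cards :=
    PySem.List.sorted_perm cards _ false
  have hpair : (PySem.List.sorted cards (fun c => c) false).Pairwise (· ≤ ·) := by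
    have h := PySem.List.sorted_pairwise cards (fun c => c)
    simpa using h
  have hM : ∀ t, (cards.foldl (fun (m : PySem.Dict Int Int) c =>
      m.insert (PySem.Int.floordiv c 9) (min (m.getD (PySem.Int.floordiv c 9) c) c))
      PySem.Dict.empty).get? t = pvMval (PySem.List.sorted cards (fun c => c) false) t := by
    intro t
    rw [pvMinfold_get?, PySem.Dict.get?_empty]
    have hv : pvMval cards t = pvMval (PySem.List.sorted cards (fun c => c) false) t :=
      pvMin?_perm _ _ ((hperm.filter _).symm)
    rw [← hv]
    cases pvMval cards t <;> rfl
  have hKnd : (cards.foldl (fun (m : PySem.Dict Int Int) c =>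
      m.insert (PySem.Int.floordiv c 9) (min (m.getD (PySem.Int.floordiv c 9) c) c))
      PySem.Dict.empty).keys.Nodup :=
    PySem.Dict.nodup_keys_foldl_insert_key cards (fun c => PySem.Int.floordiv c 9)
      (fun m c => min (m.getD (PySem.Int.floordiv c 9) c) c) PySem.Dict.empty
      PySem.Dict.nodup_keys_empty
  have hK : (cards.foldl (fun (m : PySem.Dict Int Int) c =>
      m.insert (PySem.Int.floordiv c 9) (min (m.getD (PySem.Int.floordiv c 9) c) c))
      PySem.Dict.empty).keys = PySem.Set.ofList (cards.map pvSuit) := by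
    rw [PySem.Dict.keys_foldl_insert_key cards (fun c => PySem.Int.floordiv c 9)
      (fun m c => min (m.getD (PySem.Int.floordiv c 9) c) c) PySem.Dict.empty,
      PySem.Dict.keys_empty]
    exact pvUpd0 _
  have hGD : ∀ k, (cards.foldl (fun (m : PySem.Dict Int Int) c =>
      m.insert (PySem.Int.floordiv c 9) (min (m.getD (PySem.Int.floordiv c 9) c) c))
      PySem.Dict.empty).getD k 0 = (pvMval (PySem.List.sorted cards (fun c => c) false) k).getD 0 := by
    intro k
    rw [PySem.Dict.getD_eq_get?_getD, hM]
  have hitems : (cards.foldl (fun (m : PySem.Dict Int Int) c =>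
      m.insert (PySem.Int.floordiv c 9) (min (m.getD (PySem.Int.floordiv c 9) c) c))
      PySem.Dict.empty).items
      = (PySem.Set.ofList (cards.map pvSuit)).map
          (fun k => (k, (pvMval (PySem.List.sorted cards (fun c => c) false) k).getD 0)) := by
    rw [PySem.Dict.items_eq_map_keys _ hKnd 0, hK]
    apply List.map_congr_left
    intro k _
    rw [hGD]
  have hperm2 : (PySem.Set.ofList ((PySem.List.sorted cards (fun c => c) false).map pvSuit)).Perm
      (PySem.Set.ofList (cards.map pvSuit)) := by
    refine (List.perm_ext_iff_of_nodup (PySem.Set.nodup_ofList _) (PySem.Set.nodup_ofList _)).mpr ?_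
    intro t
    rw [PySem.Set.mem_ofList, PySem.Set.mem_ofList]
    exact (hperm.map pvSuit).mem_iff
  have hpw : ((PySem.Set.ofList ((PySem.List.sorted cards (fun c => c) false).map pvSuit)).map
      (fun t => (t, (pvMval (PySem.List.sorted cards (fun c => c) false) t).getD 0))).Pairwise
      (fun a b => a.2 < b.2) := by
    rw [List.pairwise_map]
    simpa using pvChain (PySem.List.sorted cards (fun c => c) false) hpair
  have hsort : PySem.List.sorted (cards.foldl (fun (m : PySem.Dict Int Int) c =>
      m.insert (PySem.Int.floordiv c 9) (min (m.getD (PySem.Int.floordiv c 9) c) c))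
      PySem.Dict.empty).items (fun kv => kv.2) false
      = (PySem.Set.ofList ((PySem.List.sorted cards (fun c => c) false).map pvSuit)).map
          (fun t => (t, (pvMval (PySem.List.sorted cards (fun c => c) false) t).getD 0)) := by
    refine PySem.List.sorted_eq_of_perm_of_pairwise_lt _ _ _ ?_ hpw
    rw [hitems]
    exact hperm2.map _
  have hys1 : (((PySem.Set.ofList ((PySem.List.sorted cards (fun c => c) false).map pvSuit)).map
      (fun t => (t, (pvMval (PySem.List.sorted cards (fun c => c) false) t).getD 0))).map (·.1))
      = PySem.Set.ofList ((PySem.List.sorted cards (fun c => c) false).map pvSuit) := by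
    rw [List.map_map]
    exact List.map_id _
  have hL := fun t => pvLabelFold ((PySem.Set.ofList ((PySem.List.sorted cards (fun c => c) false).map pvSuit)).map
      (fun t => (t, (pvMval (PySem.List.sorted cards (fun c => c) false) t).getD 0))) 0
      PySem.Dict.empty (by rw [hys1]; exact PySem.Set.nodup_ofList _)
      (fun k _ => PySem.Dict.contains_empty k) t
  show PySem.List.sorted (cards.map (fun c => PySem.Int.mod c 9
      + (((PySem.List.enumerate (PySem.List.sorted (cards.foldl (fun (m : PySem.Dict Int Int) c =>
            m.insert (PySem.Int.floordiv c 9) (min (m.getD (PySem.Int.floordiv c 9) c) c))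
            PySem.Dict.empty).items (fun kv => kv.2) false) 0).foldl
          (fun (d : PySem.Dict Int Int) p => d.insert p.2.1 p.1) PySem.Dict.empty).get?
            (PySem.Int.floordiv c 9)).getD 0 * 9)) (fun c => c) false = _
  rw [hsort]
  congr 1
  apply List.map_congr_left
  intro c _
  rw [hL (PySem.Int.floordiv c 9), hys1]
  simp only [pvG, pvSuit]
  cases h : PySem.List.index? (PySem.Set.ofList ((PySem.List.sorted cards (fun c => c) false).map
      pvSuit)) (PySem.Int.floordiv c 9) with
  | none => simp
  | some i => simp

-- ===== VERDICT (by name: the statement is the Claim_ definition above) =====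
theorem canonicalize_hand_spec : Claim_equal_canonicalize_hand := by
  intro cards _
  unfold Spec_canonicalize_hand
  rw [pvA_eq, pvB_eq]
  exact PySem.List.sorted_eq_sorted_of_perm _ _ _ (fun a b h => h)
    ((PySem.List.sorted_perm cards (fun c => c) false).map _)
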